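-- pv_equiv track=rewrite | github.com/turtir-ai/mcp-ecosystem-platform | backend/app/services/ai_research_analyzer.py | _parse_structured_insights
-- ===== SOURCE A (Python) =====
-- from typing import Dict, List, Optional, Any, Union
--
-- def _parse_structured_insights(text: str) -> List[Dict[str, Any]]:
--     """Parse structured insights from analysis text."""
--     insights = []
--     lines = text.split('\n')
--
--     current_insight = {}
--     for line in lines:
--         line = line.strip()
--         if line.startswith(('1.', '2.', '3.', '4.', '5.')):
--             if current_insight:
--                 insights.append(current_insight)
--             current_insight = {"text": line, "category": "insight"}
--         elif line and current_insight:
--             current_insight["text"] += " " + line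
--
--     if current_insight:
--         insights.append(current_insight)
--
--     return insights
-- ===== SOURCE B (Python) =====
-- from typing import Dict, List, Optional, Any, Union
--
-- def _parse_structured_insights(text: str) -> List[Dict[str, Any]]:
--     """Parse structured insights: find header lines, then build one insight per segment."""
--     heads = ('1.', '2.', '3.', '4.', '5.')
--     rest = [l.strip() for l in text.split('\n')]
--     # drop the prologue before the first header line
--     while rest and not rest[0].startswith(heads):
--         rest.pop(0)
--     insights = []
--     while rest:
--         parts = [rest.pop(0)]
--         while rest and not rest[0].startswith(heads):
--             l = rest.pop(0)
--             if l:
--                 parts.append(l)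
--         insights.append({"text": " ".join(parts), "category": "insight"})
--     return insights
-- ===== Notes on version B (the rewrite author's own statement) =====
-- stated objective: alternative
-- what changed: Replaces A's single pass that mutates a growing current-insight dict (string +=) with a two-phase segmentation: strip all lines, drop the prologue before the first numbered header, then consume one header-delimited segment at a time and join its non-empty lines with single spaces.
import Mathlib
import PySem

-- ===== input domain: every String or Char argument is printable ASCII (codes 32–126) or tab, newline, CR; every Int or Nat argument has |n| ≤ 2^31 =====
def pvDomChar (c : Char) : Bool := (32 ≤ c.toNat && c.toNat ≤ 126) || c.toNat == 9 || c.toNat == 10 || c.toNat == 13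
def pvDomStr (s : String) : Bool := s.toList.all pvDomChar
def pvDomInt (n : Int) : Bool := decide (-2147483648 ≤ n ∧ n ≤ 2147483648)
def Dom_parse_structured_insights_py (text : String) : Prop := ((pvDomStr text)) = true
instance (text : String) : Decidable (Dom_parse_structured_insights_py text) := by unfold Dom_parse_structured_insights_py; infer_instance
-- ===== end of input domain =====

-- B replaces A's single accumulator loop (a mutated current dict) by boundary detection: strip all
-- lines, drop the prologue, then build one insight per header-delimited segment by joining its
-- non-empty lines (objective: alternative decomposition, same cost).

-- ===== PORT A =====
-- line.startswith(('1.', '2.', '3.', '4.', '5.'))  (shared by both ports: both sources test the same prefixes)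
def pvHeader (l : String) : Bool :=
  PySem.Str.startswith l "1." || PySem.Str.startswith l "2." || PySem.Str.startswith l "3." ||
    PySem.Str.startswith l "4." || PySem.Str.startswith l "5."

-- text.split('\n'); sep = "\n" ≠ "" so split? is always `some` (shared: both sources split the same way)
def pvLines (text : String) : List String := (PySem.Str.split? text "\n").getD []

-- A's loop body after `line = line.strip()`; the dict {"text": …, "category": "insight"} is a PySem.Dict
def pvStepA' (s : List (List (String × String)) × PySem.Dict String String) (line : String) :
    List (List (String × String)) × PySem.Dict String String :=
  if pvHeader line then
    ((if s.2.size ≠ 0 then s.1 ++ [s.2.items] else s.1),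
      PySem.Dict.ofList [("text", line), ("category", "insight")])
  else if line ≠ "" ∧ s.2.size ≠ 0 then
    (s.1, s.2.modify "text" "" (fun t => t ++ " " ++ line))
  else s

-- A's full loop body: `line = line.strip()` then the branches
def pvStepA (s : List (List (String × String)) × PySem.Dict String String) (line0 : String) :
    List (List (String × String)) × PySem.Dict String String :=
  pvStepA' s (PySem.Str.strip line0)

def parse_structured_insights_py (text : String) : List (List (String × String)) :=
  let r := (pvLines text).foldl pvStepA ([], PySem.Dict.empty)
  if r.2.size ≠ 0 then r.1 ++ [r.2.items] else r.1

-- ===== PORT B =====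
-- `while rest and not rest[0].startswith(heads): rest.pop(0)`
def pvDropPrologue : List String → List String
  | [] => []
  | l :: ls => if pvHeader l then l :: ls else pvDropPrologue ls

-- the inner while loop: collect the non-empty body lines up to the next header, return them with the rest
def pvCollect : List String → List String × List String
  | [] => ([], [])
  | l :: ls =>
    if pvHeader l then ([], l :: ls)
    else ((if l ≠ "" then l :: (pvCollect ls).1 else (pvCollect ls).1), (pvCollect ls).2)

-- termination fact for pvSegs (cited by its decreasing_by)
theorem pvCollect_snd_length : ∀ (ls : List String), (pvCollect ls).2.length ≤ ls.length
  | [] => le_refl _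
  | l :: ls => by
    by_cases h : pvHeader l
    · simp [pvCollect, h]
    · simp only [pvCollect, h]
      split_ifs <;> simp [Nat.le_succ_of_le (pvCollect_snd_length ls)]

-- the outer while loop: one insight per segment, its text the space-join of header and body lines
def pvSegs : List String → List (List (String × String))
  | [] => []
  | h :: ls =>
    [("text", PySem.Str.join " " (h :: (pvCollect ls).1)), ("category", "insight")] ::
      pvSegs (pvCollect ls).2
  termination_by ls => ls.length
  decreasing_by simpa using Nat.lt_succ_of_le (pvCollect_snd_length ls)

def parse_structured_insights_py_alt (text : String) : List (List (String × String)) :=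
  pvSegs (pvDropPrologue ((pvLines text).map PySem.Str.strip))

-- ===== PRECONDITION & SPEC =====
def Spec_parse_structured_insights_py (text : String) (out : List (List (String × String))) : Prop := out = parse_structured_insights_py_alt text
instance (text : String) (out : List (List (String × String))) : Decidable (Spec_parse_structured_insights_py text out) := by unfold Spec_parse_structured_insights_py; infer_instance

-- ===== CLAIM (what is proved, stated in full; the proofs are below) =====
def Claim_equal_parse_structured_insights_py : Prop := ∀ (text : String), Dom_parse_structured_insights_py text → Spec_parse_structured_insights_py text (parse_structured_insights_py text)

-- ===== LEMMAS AND PROOFS =====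
-- A's trailing `if current_insight: insights.append(current_insight)`
def pvFin (r : List (List (String × String)) × PySem.Dict String String) :
    List (List (String × String)) :=
  if r.2.size ≠ 0 then r.1 ++ [r.2.items] else r.1

-- A's current-insight dict with text t
def pvMkD (t : String) : PySem.Dict String String :=
  PySem.Dict.ofList [("text", t), ("category", "insight")]

theorem pvJoin_cons_merge (a b : String) (rest : List String) :
    PySem.Str.join " " ((a ++ " " ++ b) :: rest) = PySem.Str.join " " (a :: b :: rest) := by
  cases rest with
  | nil =>
    apply String.ext
    simp [PySem.Str.toList_join, PySem.Chars.join_singleton, PySem.Chars.join_cons_cons]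
  | cons c cs =>
    apply String.ext
    simp [PySem.Str.toList_join, PySem.Chars.join_cons_cons]

theorem pvJoin_foldl : ∀ (ps : List String) (t : String),
    ps.foldl (fun a b => a ++ " " ++ b) t = PySem.Str.join " " (t :: ps)
  | [], t => by
    apply String.ext
    simp [PySem.Str.toList_join, PySem.Chars.join_singleton]
  | l :: ps, t => by
    rw [List.foldl_cons, pvJoin_foldl ps (t ++ " " ++ l), pvJoin_cons_merge]

theorem pvSeg_run : ∀ (ls : List String) (acc : List (List (String × String))) (t : String),
    pvFin (ls.foldl pvStepA' (acc, pvMkD t)) =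
      acc ++ ([("text", (pvCollect ls).1.foldl (fun a b => a ++ " " ++ b) t), ("category", "insight")] ::
        pvSegs (pvCollect ls).2)
  | [], acc, t => by
    simp [pvFin, pvMkD, pvCollect, pvSegs, PySem.Dict.ofList]
    rfl
  | l :: ls, acc, t => by
    by_cases h : pvHeader l
    · have hstep : pvStepA' (acc, pvMkD t) l = (acc ++ [[("text", t), ("category", "insight")]], pvMkD l) := by
        simp [pvStepA', h, pvMkD]; rfl
      rw [List.foldl_cons, hstep, pvSeg_run ls _ l]
      simp [pvCollect, h, pvSegs, pvJoin_foldl]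
    · by_cases hne : l = ""
      · subst hne
        have hstep : pvStepA' (acc, pvMkD t) "" = (acc, pvMkD t) := by
          simp [pvStepA', show pvHeader "" = false from rfl]
        rw [List.foldl_cons, hstep, pvSeg_run ls acc t]
        simp [pvCollect, show pvHeader "" = false from rfl]
      · have hstep : pvStepA' (acc, pvMkD t) l = (acc, pvMkD (t ++ " " ++ l)) := by
          simp [pvStepA', h, hne, pvMkD]
          rfl
        rw [List.foldl_cons, hstep, pvSeg_run ls acc (t ++ " " ++ l)]
        simp [pvCollect, h, hne]

theorem pvMain : ∀ (ls : List String) (acc : List (List (String × String))),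
    pvFin (ls.foldl pvStepA' (acc, PySem.Dict.empty)) = acc ++ pvSegs (pvDropPrologue ls)
  | [], acc => by simp [pvFin, pvDropPrologue, pvSegs, PySem.Dict.empty, PySem.Dict.size]
  | l :: ls, acc => by
    by_cases h : pvHeader l
    · have hstep : pvStepA' (acc, PySem.Dict.empty) l = (acc, pvMkD l) := by
        simp [pvStepA', h, pvMkD]
      rw [List.foldl_cons, hstep, pvSeg_run ls acc l]
      rw [pvDropPrologue]
      simp [h, pvSegs, pvJoin_foldl]
    · have hstep : pvStepA' (acc, PySem.Dict.empty) l = (acc, PySem.Dict.empty) := by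
        simp [pvStepA', h, PySem.Dict.empty]
        intro _ hs
        exact absurd rfl hs
      rw [List.foldl_cons, hstep, pvMain ls acc]
      simp [pvDropPrologue, h]

-- ===== VERDICT (by name: the statement is the Claim_ definition above) =====
theorem parse_structured_insights_py_spec : Claim_equal_parse_structured_insights_py := by
  intro text _
  unfold Spec_parse_structured_insights_py parse_structured_insights_py parse_structured_insights_py_alt
  have h1 : (pvLines text).foldl pvStepA ([], PySem.Dict.empty) =
      ((pvLines text).map PySem.Str.strip).foldl pvStepA' ([], PySem.Dict.empty) := by
    rw [List.foldl_map]; rfl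
  show pvFin ((pvLines text).foldl pvStepA ([], PySem.Dict.empty)) = _
  rw [h1, pvMain]
  rfl
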